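-- pv_equiv track=rewrite | github.com/arwls1nzdw/pf2wor-kr | namuwiki.py | to_jbp_name
-- ===== SOURCE A (Python) =====
-- def to_jbp_name(text):
--     text_filter = [
--         ('`', ''),
--         (',', ''),
--         ("'", ''),
--         ('-', '')
--     ]
--     for f in text_filter:
--         text = text.replace(f[0], f[1])
--     return ''.join(map(lambda s: s.capitalize(), text.split(' ')))
-- ===== SOURCE B (Python) =====
-- def to_jbp_name(text):
--     out = []
--     buf = ''
--     for ch in text:
--         if ch in "`,'-":
--             continue
--         if ch == ' ':
--             out.append(buf.capitalize())
--             buf = ''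
--         else:
--             buf += ch
--     out.append(buf.capitalize())
--     return ''.join(out)
-- ===== Notes on version B (the rewrite author's own statement) =====
-- stated objective: alternative
-- what changed: Replaced A's four whole-string replace passes plus split/map/join with a single character pass that skips punctuation, splits on spaces into a word buffer, and capitalizes each word as it is flushed.
import Mathlib
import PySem

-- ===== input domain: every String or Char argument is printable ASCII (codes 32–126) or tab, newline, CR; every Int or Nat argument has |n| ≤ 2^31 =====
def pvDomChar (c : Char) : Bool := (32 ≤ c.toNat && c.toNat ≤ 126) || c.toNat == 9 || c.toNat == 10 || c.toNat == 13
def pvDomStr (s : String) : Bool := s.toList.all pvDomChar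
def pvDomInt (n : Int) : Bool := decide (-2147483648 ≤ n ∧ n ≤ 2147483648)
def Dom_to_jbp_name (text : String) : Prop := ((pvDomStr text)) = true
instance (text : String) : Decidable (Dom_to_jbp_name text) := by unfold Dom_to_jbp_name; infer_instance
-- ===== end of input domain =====

-- B replaces A's four whole-string replace passes + split/map/join with one character pass
-- (skip punctuation, flush the word buffer at spaces, capitalize on flush); objective: alternative.

-- hand port of str.capitalize (no PySem primitive): first char titlecased, rest lowercased;
-- exact on ASCII (titlecase = upperChar there), which covers all of Dom_to_jbp_name.
def pyCapChars (s : List Char) : List Char :=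
  match s with
  | [] => []
  | c :: t => PySem.Chars.upperChar c :: PySem.Chars.lower t

def pyCapStr (s : String) : String := String.ofList (pyCapChars s.toList)

-- ===== PORT A =====
def to_jbp_name (text : String) : String :=
  let filters : List (String × String) := [("`",""), (",",""), ("'",""), ("-","")]
  let t := filters.foldl (fun s f => PySem.Str.replace s f.1 f.2) text
  PySem.Str.join "" (((PySem.Str.split? t " ").getD []).map pyCapStr)

-- ===== PORT B =====
-- ch in "`,'-"
def isPunctB (c : Char) : Bool := c == '`' || c == ',' || c == '\'' || c == '-'

def loopB : List Char → List Char → List (List Char) → List (List Char)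
  | [], buf, out => out ++ [pyCapChars buf]
  | c :: rest, buf, out =>
    if isPunctB c then loopB rest buf out
    else if c = ' ' then loopB rest [] (out ++ [pyCapChars buf])
    else loopB rest (buf ++ [c]) out

def to_jbp_name_alt (text : String) : String :=
  String.ofList (PySem.Chars.join [] (loopB text.toList [] []))

-- ===== PRECONDITION & SPEC =====
def Spec_to_jbp_name (text : String) (out : String) : Prop := out = to_jbp_name_alt text
instance (text : String) (out : String) : Decidable (Spec_to_jbp_name text out) := by unfold Spec_to_jbp_name; infer_instance

-- ===== CLAIM (what is proved, stated in full; the proofs are below) =====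
def Claim_equal_to_jbp_name : Prop := ∀ (text : String), Dom_to_jbp_name text → Spec_to_jbp_name text (to_jbp_name text)

-- ===== LEMMAS AND PROOFS =====

-- reference splitter on a single space, used only by the proofs
def splitSp : List Char → List (List Char)
  | [] => [[]]
  | c :: t =>
    if c = ' ' then [] :: splitSp t
    else
      match splitSp t with
      | [] => [[c]]
      | w :: ws => (c :: w) :: ws

theorem splitSp_ne_nil (l : List Char) : splitSp l ≠ [] := by
  induction l with
  | nil => simp [splitSp]
  | cons c t ih =>
    simp only [splitSp]
    split
    · simp
    · cases h : splitSp t <;> simp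

theorem replace_go_single (c : Char) :
    ∀ (fuel : Nat) (l acc : List Char), l.length ≤ fuel →
      PySem.Chars.replace.go [c] [] fuel l acc
        = acc.reverse ++ l.filter (fun x => !(x == c)) := by
  intro fuel
  induction fuel with
  | zero =>
    intro l acc h
    have : l = [] := by cases l <;> simp_all
    subst this
    simp [PySem.Chars.replace.go]
  | succ n ih =>
    intro l acc h
    cases l with
    | nil => simp [PySem.Chars.replace.go]
    | cons d t =>
      simp only [PySem.Chars.replace.go]
      by_cases hdc : d = c
      · subst hdc
        have hp : List.isPrefixOf [d] (d :: t) = true := by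
          simp [List.isPrefixOf]
        rw [if_pos hp]
        have hdrop : List.drop (List.length [d]) (d :: t) = t := by simp
        rw [hdrop]
        simp only [List.length_cons] at h
        rw [ih _ _ (by omega)]
        simp
      · have hp : List.isPrefixOf [c] (d :: t) = false := by
          simp [List.isPrefixOf]
          exact fun hc => absurd hc.symm hdc
        rw [if_neg (by simp [hp])]
        simp only [List.length_cons] at h
        rw [ih _ _ (by omega)]
        simp [hdc]

theorem replace_single (l : List Char) (c : Char) :
    PySem.Chars.replace l [c] [] = l.filter (fun x => !(x == c)) := by
  rw [PySem.Chars.replace]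
  simp only [List.isEmpty_cons]
  rw [replace_go_single c l.length l [] le_rfl]
  simp

-- head-merging helper for the loop invariant
def consHead (buf : List Char) : List (List Char) → List (List Char)
  | [] => [buf]
  | w :: ws => (buf ++ w) :: ws

theorem splitOn_go_space :
    ∀ (fuel : Nat) (l cur : List Char) (acc : List (List Char)), l.length ≤ fuel →
      PySem.Chars.splitOn.go [' '] fuel l cur acc
        = acc.reverse ++ consHead cur.reverse (splitSp l) := by
  intro fuel
  induction fuel with
  | zero =>
    intro l cur acc h
    have : l = [] := by cases l <;> simp_all
    subst this
    simp [PySem.Chars.splitOn.go, splitSp, consHead]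
  | succ n ih =>
    intro l cur acc h
    cases l with
    | nil => simp [PySem.Chars.splitOn.go, splitSp, consHead]
    | cons c t =>
      simp only [PySem.Chars.splitOn.go]
      by_cases hc : c = ' '
      · subst hc
        have hp : List.isPrefixOf [' '] (' ' :: t) = true := by simp [List.isPrefixOf]
        rw [if_pos hp]
        have hdrop : List.drop (List.length [' ']) (' ' :: t) = t := by simp
        rw [hdrop]
        simp only [List.length_cons] at h
        rw [ih _ _ _ (by omega)]
        have hsp : splitSp (' ' :: t) = [] :: splitSp t := by simp [splitSp]
        rw [hsp]
        cases hs : splitSp t with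
        | nil => exact absurd hs (splitSp_ne_nil t)
        | cons w ws => simp [consHead]
      · have hp : List.isPrefixOf [' '] (c :: t) = false := by
          simp [List.isPrefixOf]
          exact fun hcc => absurd hcc.symm hc
        rw [if_neg (by simp [hp])]
        simp only [List.length_cons] at h
        rw [ih _ _ _ (by omega)]
        simp only [splitSp, if_neg hc]
        cases hs : splitSp t with
        | nil => exact absurd hs (splitSp_ne_nil t)
        | cons w ws => simp [consHead]

theorem splitOn_space (l : List Char) :
    PySem.Chars.splitOn l [' '] = splitSp l := by
  rw [PySem.Chars.splitOn, splitOn_go_space (l.length + 1) l [] [] (by omega)]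
  cases hs : splitSp l with
  | nil => exact absurd hs (splitSp_ne_nil l)
  | cons w ws => simp [consHead]

theorem loopB_eq :
    ∀ (l buf : List Char) (out : List (List Char)),
      loopB l buf out
        = out ++ (consHead buf (splitSp (l.filter (fun c => !(isPunctB c))))).map pyCapChars := by
  intro l
  induction l with
  | nil => intro buf out; simp [loopB, splitSp, consHead]
  | cons c t ih =>
    intro buf out
    by_cases hp : isPunctB c
    · simp [loopB, hp, ih]
    · simp only [loopB, hp, if_false, Bool.false_eq_true, List.filter_cons, Bool.not_false,
        if_true]
      by_cases hc : c = ' '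
      · subst hc
        rw [if_pos rfl, ih [] (out ++ [pyCapChars buf])]
        have hsp : splitSp (' ' :: t.filter (fun c => !(isPunctB c))) = [] :: splitSp (t.filter (fun c => !(isPunctB c))) := by
          simp [splitSp]
        rw [hsp]
        cases hs : splitSp (t.filter (fun c => !(isPunctB c))) with
        | nil => exact absurd hs (splitSp_ne_nil _)
        | cons w ws => simp [consHead]
      · rw [if_neg hc, ih (buf ++ [c]) out]
        have hsp : splitSp (c :: t.filter (fun c => !(isPunctB c)))
            = match splitSp (t.filter (fun c => !(isPunctB c))) with
              | [] => [[c]]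
              | w :: ws => (c :: w) :: ws := by
          simp [splitSp, hc]
        rw [hsp]
        cases hs : splitSp (t.filter (fun c => !(isPunctB c))) with
        | nil => exact absurd hs (splitSp_ne_nil _)
        | cons w ws => simp [consHead]

theorem filter_chain (l : List Char) :
    ((((l.filter (fun x => !(x == '`'))).filter (fun x => !(x == ','))).filter
        (fun x => !(x == '\''))).filter (fun x => !(x == '-')))
      = l.filter (fun c => !(isPunctB c)) := by
  simp only [List.filter_filter]
  apply List.filter_congr
  intro a _
  simp only [isPunctB, Bool.not_or]
  ac_rfl

-- ===== VERDICT (by name: the statement is the Claim_ definition above) =====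
theorem to_jbp_name_spec : Claim_equal_to_jbp_name := by
  intro text _
  show to_jbp_name text = to_jbp_name_alt text
  unfold to_jbp_name to_jbp_name_alt
  simp only [List.foldl]
  have hsplit : PySem.Str.split?
      (PySem.Str.replace (PySem.Str.replace (PySem.Str.replace (PySem.Str.replace text "`" "") "," "") "'" "") "-" "") " "
      = some ((PySem.Chars.splitOn
          (PySem.Str.replace (PySem.Str.replace (PySem.Str.replace (PySem.Str.replace text "`" "") "," "") "'" "") "-" "").toList
          [' ']).map String.ofList) := by
    simp [PySem.Str.split?, PySem.Chars.split?]
  rw [hsplit]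
  simp only [Option.getD_some]
  have htl : (PySem.Str.replace (PySem.Str.replace (PySem.Str.replace (PySem.Str.replace text "`" "") "," "") "'" "") "-" "").toList
      = text.toList.filter (fun c => !(isPunctB c)) := by
    simp only [PySem.Str.toList_replace]
    have h1 : ("`" : String).toList = ['`'] := rfl
    have h2 : ("," : String).toList = [','] := rfl
    have h3 : ("'" : String).toList = ['\''] := rfl
    have h4 : ("-" : String).toList = ['-'] := rfl
    have h0 : ("" : String).toList = [] := rfl
    rw [h1, h2, h3, h4, h0]
    rw [replace_single, replace_single, replace_single, replace_single]
    exact filter_chain _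
  rw [htl, splitOn_space, loopB_eq]
  rw [PySem.Str.join]
  have hsep : ("" : String).toList = [] := rfl
  rw [hsep]
  cases hs : splitSp (text.toList.filter (fun c => !(isPunctB c))) with
  | nil => exact absurd hs (splitSp_ne_nil _)
  | cons w ws =>
    simp only [consHead, List.nil_append, List.map_map]
    refine congrArg String.ofList (congrArg (PySem.Chars.join []) ?_)
    apply List.map_congr_left
    intro x _
    simp [pyCapStr]
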